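-- pv_equiv track=rewrite | github.com/gaygysyz2003/python.projects | pyramid_area1.py | overall_side_area
-- ===== SOURCE A (Python) =====
-- def overall_side_area(sides, num):
--   total_sides = 0
--   i = 1
--   while i<=num:
--     total_sides += i
--     i+=1
--   area_for_each_side = sides*sides
--   calculated_side_area = total_sides * 3 * area_for_each_side
--   return calculated_side_area
-- ===== SOURCE B (Python) =====
-- def overall_side_area(sides, num):
--   total_sides = num * (num + 1) // 2 if num >= 1 else 0
--   return total_sides * 3 * sides * sides
-- ===== Notes on version B (the rewrite author's own statement) =====
-- stated objective: faster
-- what changed: replaced the O(num) summation loop with the closed-form triangular number num*(num+1)//2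
import Mathlib
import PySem

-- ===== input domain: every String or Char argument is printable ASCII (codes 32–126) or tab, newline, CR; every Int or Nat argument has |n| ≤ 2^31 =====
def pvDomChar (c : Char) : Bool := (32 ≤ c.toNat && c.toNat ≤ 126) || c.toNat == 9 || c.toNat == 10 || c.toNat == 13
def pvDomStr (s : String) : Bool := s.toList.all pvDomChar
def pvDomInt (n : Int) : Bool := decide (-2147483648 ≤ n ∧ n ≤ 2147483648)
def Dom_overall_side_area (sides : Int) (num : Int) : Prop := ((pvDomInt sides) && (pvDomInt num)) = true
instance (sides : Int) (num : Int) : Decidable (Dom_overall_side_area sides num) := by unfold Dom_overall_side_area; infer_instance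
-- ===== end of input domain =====

-- B replaces A's O(num) summation loop with the closed-form triangular number; proved equal for all inputs.


-- ===== PORT A =====
-- the while loop of A: while i <= num: total += i; i += 1
def pvLoopA (num : Int) (i : Int) (total : Int) : Int :=
  if _h : i ≤ num then pvLoopA num (i + 1) (total + i) else total
termination_by (num + 1 - i).toNat
decreasing_by omega

def overall_side_area (sides : Int) (num : Int) : Int :=
  let total_sides := pvLoopA num 1 0
  let area_for_each_side := sides * sides
  total_sides * 3 * area_for_each_side

-- ===== PORT B =====
def overall_side_area_alt (sides : Int) (num : Int) : Int :=
  let total_sides := if num ≥ 1 then PySem.Int.floordiv (num * (num + 1)) 2 else 0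
  total_sides * 3 * sides * sides

-- ===== PRECONDITION & SPEC =====
def Spec_overall_side_area (sides : Int) (num : Int) (out : Int) : Prop := out = overall_side_area_alt sides num
instance (sides : Int) (num : Int) (out : Int) : Decidable (Spec_overall_side_area sides num out) := by unfold Spec_overall_side_area; infer_instance

-- ===== CLAIM (what is proved, stated in full; the proofs are below) =====
def Claim_equal_overall_side_area : Prop := ∀ (sides : Int) (num : Int), Dom_overall_side_area sides num → Spec_overall_side_area sides num (overall_side_area sides num)

-- ===== LEMMAS AND PROOFS =====
theorem pvLoopA_closed (num i total : Int) :
    2 * pvLoopA num i total = 2 * total + (if i ≤ num then (num - i + 1) * (i + num) else 0) := by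
  induction i, total using pvLoopA.induct num with
  | case1 i total h ih =>
    rw [pvLoopA, dif_pos h, ih, if_pos h]
    by_cases h2 : i + 1 ≤ num
    · rw [if_pos h2]; ring
    · have : i = num := by omega
      rw [if_neg h2]; subst this; ring
  | case2 i total h =>
    rw [pvLoopA]
    simp [h]

theorem loop_eq_tri (num : Int) :
    pvLoopA num 1 0 = if num ≥ 1 then PySem.Int.floordiv (num * (num + 1)) 2 else 0 := by
  have h := pvLoopA_closed num 1 0
  by_cases h1 : 1 ≤ num
  · simp only [if_pos h1, ge_iff_le] at h ⊢
    have hval : num * (num + 1) = 2 * pvLoopA num 1 0 := by rw [h]; ring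
    rw [hval, PySem.Int.floordiv, Int.mul_fdiv_cancel_left _ (by norm_num)]
  · simp only [if_neg h1, ge_iff_le] at h ⊢
    omega

-- ===== VERDICT (by name: the statement is the Claim_ definition above) =====
theorem overall_side_area_spec : Claim_equal_overall_side_area := by
  intro sides num _
  unfold Spec_overall_side_area overall_side_area overall_side_area_alt
  rw [loop_eq_tri]
  ring
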